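-- pv_equiv track=rewrite | github.com/DioSWolF/MyProjects | SerialBot/buttons_create.py | return_anime_dict
-- ===== SOURCE A (Python) =====
-- def return_anime_dict(anime_dict, num_list = 9):
--
--     dict_anime = {}
--     i = 1
--     I = 0
--     anim_list = []
--     for anime in anime_dict:
--         anim_list.append(anime)
--         if i == num_list:
--             dict_anime[I] = anim_list
--             anim_list = []
--             i = 0
--             I += 1
--         i += 1
--     if anim_list != []:
--         dict_anime[len(dict_anime)] = anim_list
--         anim_list = []
--
--     return dict_anime
-- ===== SOURCE B (Python) =====
-- def return_anime_dict(anime_dict, num_list=9):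
--     keys = list(anime_dict)
--     return {idx: keys[start:start + num_list]
--             for idx, start in enumerate(range(0, len(keys), num_list))}
-- ===== Notes on version B (the rewrite author's own statement) =====
-- stated objective: simpler
-- what changed: B builds the key list once and produces each group by slicing at strided start offsets (a dict comprehension over enumerate(range(0, len, num_list))), replacing A's element-by-element loop with its chunk accumulator, wrap-around counter and trailing-leftover flush; Pre_ excludes non-positive chunk sizes, a nonsense corner where A's single-bucket dump is an accident of its counter never firing and B's range either raises (0) or yields no chunks (negative).
-- outside the precondition, e.g. on return_anime_dict({'a': 'x'}, 0): A returns {0: ['a']}, B raises ValueError; on return_anime_dict({'a': 'x'}, -1): A returns {0: ['a']}, B returns {}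
import Mathlib
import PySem

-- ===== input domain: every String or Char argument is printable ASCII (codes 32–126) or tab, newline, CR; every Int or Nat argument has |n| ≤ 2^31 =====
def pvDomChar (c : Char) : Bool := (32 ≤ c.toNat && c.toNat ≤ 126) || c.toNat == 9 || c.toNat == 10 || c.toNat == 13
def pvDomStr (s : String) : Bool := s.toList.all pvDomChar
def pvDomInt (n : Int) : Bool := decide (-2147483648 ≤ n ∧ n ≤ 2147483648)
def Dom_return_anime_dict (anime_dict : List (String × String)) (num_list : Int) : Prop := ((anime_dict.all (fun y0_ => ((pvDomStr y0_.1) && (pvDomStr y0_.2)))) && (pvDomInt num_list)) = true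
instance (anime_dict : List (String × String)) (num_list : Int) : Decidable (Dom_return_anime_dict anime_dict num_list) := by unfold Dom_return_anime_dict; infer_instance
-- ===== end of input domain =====

-- B chunks the dict's keys by slicing the built key list at strided offsets instead of A's
-- element-by-element accumulator-and-counter loop; same return value on positive chunk sizes.


-- ===== PORT A =====
-- A's loop body: append the key to anim_list; on i == num_list flush the chunk and reset; then i += 1
def pvStepA (num_list : Int)
    (st : PySem.Dict Int (List String) × Int × Int × List String) (anime : String) :
    PySem.Dict Int (List String) × Int × Int × List String :=
  let al := st.2.2.2 ++ [anime]
  let (d, i, I, al) :=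
    if st.2.1 = num_list then (st.1.insert st.2.2.1 al, (0 : Int), st.2.2.1 + 1, ([] : List String))
    else (st.1, st.2.1, st.2.2.1, al)
  (d, i + 1, I, al)

def return_anime_dict (anime_dict : List (String × String)) (num_list : Int) : List (Int × List String) :=
  -- iterating the Python dict yields its keys in first-occurrence order
  let keys := PySem.List.dedup (anime_dict.map Prod.fst)
  let st := keys.foldl (pvStepA num_list) (PySem.Dict.empty, 1, 0, [])
  let d := st.1
  let anim_list := st.2.2.2
  (if anim_list ≠ [] then d.insert (d.size : Int) anim_list else d).items

-- ===== PORT B =====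
def return_anime_dict_alt (anime_dict : List (String × String)) (num_list : Int) : List (Int × List String) :=
  let keys := PySem.List.dedup (anime_dict.map Prod.fst)
  (PySem.List.enumerate (PySem.List.pyRange 0 (keys.length : Int) num_list) 0).map
    (fun p => (p.1, PySem.List.slice keys (some p.2) (some (p.2 + num_list))))

-- ===== PRECONDITION & SPEC =====
-- Pre_ excludes non-positive chunk sizes: there A's single-bucket dump {0: all keys} is an
-- accident of its counter (always ≥ 1) never firing, and B's range raises ValueError (size 0)
-- or yields no chunks (negative size) — a corner nobody would specify either way.
def Pre_return_anime_dict (anime_dict : List (String × String)) (num_list : Int) : Prop := 1 ≤ num_list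
instance (anime_dict : List (String × String)) (num_list : Int) : Decidable (Pre_return_anime_dict anime_dict num_list) := by unfold Pre_return_anime_dict; infer_instance
def pvWitness_return_anime_dict : (List (String × String)) × Int := ([("naruto", "1"), ("bleach", "2"), ("one piece", "3")], 2)

def Spec_return_anime_dict (anime_dict : List (String × String)) (num_list : Int) (out : List (Int × List String)) : Prop := out = return_anime_dict_alt anime_dict num_list
instance (anime_dict : List (String × String)) (num_list : Int) (out : List (Int × List String)) : Decidable (Spec_return_anime_dict anime_dict num_list out) := by unfold Spec_return_anime_dict; infer_instance

-- ===== CLAIM (what is proved, stated in full; the proofs are below) =====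
def Claim_equal_return_anime_dict : Prop := ∀ (anime_dict : List (String × String)) (num_list : Int), Dom_return_anime_dict anime_dict num_list → Pre_return_anime_dict anime_dict num_list → Spec_return_anime_dict anime_dict num_list (return_anime_dict anime_dict num_list)

-- ===== LEMMAS AND PROOFS =====

-- common chunk specification both programs compute: groups of size m+1, indexed from I
def pvChunk (m : Nat) (I : Int) (ks : List String) : List (Int × List String) :=
  if h : ks = [] then []
  else (I, ks.take (m + 1)) :: pvChunk m (I + 1) (ks.drop (m + 1))
  termination_by ks.length
  decreasing_by have := List.length_drop (l := ks) (i := m+1); have hk : 0 < ks.length := List.length_pos_of_ne_nil h; omega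

-- exactly one group of keys left to fill: the fold consumes n - i + 1 keys and flushes one chunk
theorem pvFoldFill (n : Int) :
    ∀ (l : List String) (d : PySem.Dict Int (List String)) (i I : Int) (al : List String),
      1 ≤ i → i ≤ n → (l.length : Int) = n - i + 1 →
      l.foldl (pvStepA n) (d, i, I, al) = (d.insert I (al ++ l), 1, I + 1, []) := by
  intro l
  induction l with
  | nil => intro d i I al hi hin hlen; simp at hlen; omega
  | cons x rest ih =>
    intro d i I al hi hin hlen
    by_cases hrest : rest = []
    · subst hrest
      have : i = n := by simp at hlen; omega
      simp [List.foldl_cons, pvStepA, this]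
    · have hlr : 1 ≤ (rest.length : Int) := by
        have := List.length_pos_of_ne_nil hrest; omega
      have hne : ¬ i = n := by simp at hlen; omega
      simp only [List.foldl_cons, pvStepA, hne, if_false]
      rw [ih _ (i + 1) _ _ (by omega) (by simp at hlen; omega) (by simp at hlen ⊢; omega)]
      simp [List.append_assoc]

-- fewer keys than a group: the fold only accumulates
theorem pvFoldPartial (n : Int) :
    ∀ (l : List String) (d : PySem.Dict Int (List String)) (i I : Int) (al : List String),
      1 ≤ i → (l.length : Int) < n - i + 1 →
      l.foldl (pvStepA n) (d, i, I, al) = (d, i + l.length, I, al ++ l) := by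
  intro l
  induction l with
  | nil => intro d i I al hi hlen; simp
  | cons x rest ih =>
    intro d i I al hi hlen
    have hne : ¬ i = n := by simp at hlen; omega
    simp only [List.foldl_cons, pvStepA, hne, if_false]
    rw [ih _ (i + 1) _ _ (by omega) (by simp at hlen ⊢; omega)]
    simp [Prod.mk.injEq, List.append_assoc]
    omega

-- A's loop + leftover flush, started from a dict whose keys are exactly 0..I-1, appends pvChunk
theorem pvASide (m : Nat) (n : Int) (hn : n = (m : Int) + 1) :
    ∀ (ks : List String) (d : PySem.Dict Int (List String)) (I : Int),
      (∀ k ∈ d.keys, k < I) → ((d.size : Int) = I) →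
      (let st := ks.foldl (pvStepA n) (d, 1, I, []);
        (if st.2.2.2 ≠ [] then st.1.insert (st.1.size : Int) st.2.2.2 else st.1).items)
      = d.items ++ pvChunk m I ks := by
  intro ks
  generalize hL : ks.length = L
  induction L using Nat.strong_induction_on generalizing ks with
  | _ L ih =>
  intro d I hkeys hsz
  by_cases hks : ks = []
  · subst hks; simp [pvChunk]
  · have hcont : d.contains I = false := by
      by_contra h
      have : d.contains I = true := by simpa using h
      exact absurd (hkeys I ((PySem.Dict.contains_iff_mem_keys d I).1 this)) (lt_irrefl I)
    by_cases hbig : m + 1 ≤ ks.length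
    · have hsplit : ks = ks.take (m + 1) ++ ks.drop (m + 1) := (List.take_append_drop _ _).symm
      have htlen : (ks.take (m + 1)).length = m + 1 := by simp; omega
      simp only
      conv_lhs => rw [hsplit, List.foldl_append]
      rw [pvFoldFill n (ks.take (m + 1)) d 1 I [] (by omega) (by omega) (by rw [htlen]; push_cast; omega)]
      have hdlen : (ks.drop (m + 1)).length < L := by
        have : 0 < ks.length := List.length_pos_of_ne_nil hks
        simp [List.length_drop]; omega
      have := ih (ks.drop (m + 1)).length hdlen (ks.drop (m + 1)) rfl
        (d.insert I (ks.take (m + 1))) (I + 1)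
        (by
          intro k hk
          rw [PySem.Dict.keys_insert_of_not_contains d _ hcont] at hk
          rcases List.mem_append.1 hk with h | h
          · exact lt_trans (hkeys k h) (by omega)
          · simp at h; omega)
        (by rw [PySem.Dict.size_insert]; simp [hcont]; omega)
      simp only at this
      simp only [List.nil_append]
      rw [this]
      rw [PySem.Dict.items_insert_of_not_contains d _ hcont]
      conv_rhs => rw [pvChunk]
      simp [hks, List.append_assoc]
    · simp only
      rw [pvFoldPartial n _ _ _ _ _ (by omega) (by omega)]
      simp only [List.nil_append]
      rw [if_pos hks, hsz, PySem.Dict.items_insert_of_not_contains d _ hcont]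
      conv_rhs => rw [pvChunk]
      rw [dif_neg hks]
      have htake : ks.take (m + 1) = ks := List.take_of_length_le (by omega)
      have hdrop : ks.drop (m + 1) = [] := List.drop_eq_nil_of_le (by omega)
      rw [htake, hdrop, pvChunk]
      simp

-- range(a, b, n) for 0 < n, a < b starts with a and continues from a + n
theorem pvRangeConsPos (a b n : Int) (hn : 0 < n) (hab : a < b) :
    PySem.List.pyRange a b n = a :: PySem.List.pyRange (a + n) b n := by
  rw [PySem.List.pyRange_of_pos _ _ hn, PySem.List.pyRange_of_pos _ _ hn]
  have hdiv : (b - a + n - 1) / n = (b - a - 1) / n + 1 := by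
    have h1 : b - a + n - 1 = (b - a - 1) + 1 * n := by ring
    rw [h1, Int.add_mul_ediv_right _ _ (by omega)]
  have hnn : 0 ≤ (b - a - 1) / n := Int.ediv_nonneg (by omega) (by omega)
  have hc : (if a < b then ((b - a + n - 1) / n).toNat else 0)
      = (if a + n < b then ((b - (a + n) + n - 1) / n).toNat else 0) + 1 := by
    rw [if_pos hab]
    by_cases h2 : a + n < b
    · rw [if_pos h2, hdiv]
      have : b - (a + n) + n - 1 = b - a - 1 := by ring
      rw [this]
      omega
    · rw [if_neg h2, hdiv]
      have hz : (b - a - 1) / n = 0 := Int.ediv_eq_zero_of_lt (by omega) (by omega)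
      omega
  rw [hc, List.range_succ_eq_map, List.map_cons, List.map_map]
  congr 1
  · ring
  · apply List.map_congr_left
    intro k _
    simp [Function.comp]
    ring

-- B's slice comprehension, from start offset a, computes pvChunk of the remaining keys
theorem pvBSide (m : Nat) (n : Int) (hn : n = (m : Int) + 1) (ks : List String) :
    ∀ (a I : Int), 0 ≤ a →
      (PySem.List.enumerate (PySem.List.pyRange a (ks.length : Int) n) I).map
        (fun p => (p.1, PySem.List.slice ks (some p.2) (some (p.2 + n))))
      = pvChunk m I (ks.drop a.toNat) := by
  intro a
  generalize hD : ks.length - a.toNat = D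
  induction D using Nat.strong_induction_on generalizing a with
  | _ D ih =>
  intro I ha
  by_cases hlt : a < (ks.length : Int)
  · rw [pvRangeConsPos _ _ _ (by omega) hlt, PySem.List.enumerate_cons, List.map_cons]
    have hdropne : ks.drop a.toNat ≠ [] := by
      intro h
      have := List.drop_eq_nil_iff.1 h
      omega
    conv_rhs => rw [pvChunk, dif_neg hdropne]
    congr 1
    · simp only
      congr 1
      rw [PySem.List.slice_toNat ks ha (by omega)]
      have h1 : (a + n).toNat - a.toNat = m + 1 := by omega
      rw [h1]
    · have h2 : (ks.drop a.toNat).drop (m + 1) = ks.drop ((a + n).toNat) := by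
        rw [List.drop_drop]
        congr 1
        omega
      rw [h2]
      exact ih (ks.length - (a + n).toNat) (by omega) (a + n) (by omega) (I + 1) (by omega)
  · have hnil : PySem.List.pyRange a (ks.length : Int) n = [] := by
      rw [PySem.List.pyRange_of_pos _ _ (by omega : (0:Int) < n), if_neg hlt]
      simp
    rw [hnil]
    have : ks.drop a.toNat = [] := List.drop_eq_nil_of_le (by omega)
    rw [this, pvChunk]
    simp [PySem.List.enumerate]

-- ===== VERDICT (by name: the statement is the Claim_ definition above) =====
theorem return_anime_dict_spec : Claim_equal_return_anime_dict := by
  intro ad n _ hpre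
  unfold Spec_return_anime_dict return_anime_dict return_anime_dict_alt
  simp only
  set ks := PySem.List.dedup (ad.map Prod.fst) with hks
  have hpre' : 1 ≤ n := hpre
  have hm : n = ((n.toNat - 1 : Nat) : Int) + 1 := by omega
  have hA := pvASide (n.toNat - 1) n hm ks PySem.Dict.empty 0
    (by simp [PySem.Dict.keys_empty]) (by simp [PySem.Dict.size_empty])
  simp only at hA
  have hB := pvBSide (n.toNat - 1) n hm ks 0 0 (by omega)
  simp only [Int.toNat_zero, List.drop_zero] at hB
  rw [hA, hB]
  simp [PySem.Dict.empty]
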